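-- pv_equiv track=rewrite | github.com/BlockchainCollab/HenryCoder | backend/code_doctor.py | fix_underscores
-- ===== SOURCE A (Python) =====
-- def fix_underscores(code: str) -> str:
--     # Iterate and rebuild string, skipping strings and comments
--     result = []
--     i = 0
--     n = len(code)
--
--     while i < n:
--         # Check for string start (double quotes)
--         if code[i] == '"':
--             # Find end of string
--             result.append('"')
--             i += 1
--             while i < n:
--                 result.append(code[i])
--                 if code[i] == '"' and code[i-1] != '\\':
--                     i += 1
--                     break
--                 i += 1
--             continue
--
--         # Check for backtick string (b`...`)
--         if code[i:i+2] == 'b`':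
--             result.append('b`')
--             i += 2
--             while i < n:
--                 result.append(code[i])
--                 if code[i] == '`':
--                     i += 1
--                     break
--                 i += 1
--             continue
--
--         # Check for comment //
--         if code[i:i+2] == '//':
--             # Read until newline
--             while i < n and code[i] != '\n':
--                 result.append(code[i])
--                 i += 1
--             continue
--
--         # Check for identifier starting with _
--         # We need to check if we are at a word boundary
--         if code[i] == '_':
--             # Check previous char
--             prev_char = code[i-1] if i > 0 else ' '
--             if not prev_char.isalnum() and prev_char != '_':
--                 # It is a start of an identifier?
--                 # Check next char
--                 if i+1 < n and code[i+1].isalnum():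
--                     # Found _Identifier
--                     # Capture identifier
--                     j = i + 1
--                     ident = ""
--                     while j < n and (code[j].isalnum() or code[j] == '_'):
--                         ident += code[j]
--                         j += 1
--
--                     # Append Identifier_
--                     result.append(ident + "_")
--                     i = j
--                     continue
--
--         result.append(code[i])
--         i += 1
--
--     return "".join(result)
-- ===== SOURCE B (Python) =====
-- def fix_underscores(code: str) -> str:
--     # Token-jumping rewriter: finds delimiters with str.find and emits whole
--     # slices, instead of walking char-by-char with nested loops.
--     n = len(code)
--     parts = []
--     i = 0
--     while i < n:
--         c = code[i]
--         if c == '"':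
--             j = code.find('"', i + 1)
--             while j != -1 and code[j - 1] == '\\':
--                 j = code.find('"', j + 1)
--             end = n if j == -1 else j + 1
--             parts.append(code[i:end])
--             i = end
--         elif code.startswith('b`', i):
--             j = code.find('`', i + 2)
--             end = n if j == -1 else j + 1
--             parts.append(code[i:end])
--             i = end
--         elif code.startswith('//', i):
--             j = code.find('\n', i)
--             end = n if j == -1 else j
--             parts.append(code[i:end])
--             i = end
--         elif c == '_':
--             prev = code[i - 1] if i else ' '
--             if not (prev.isalnum() or prev == '_') and i + 1 < n and code[i + 1].isalnum():
--                 j = i + 1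
--                 while j < n and (code[j].isalnum() or code[j] == '_'):
--                     j += 1
--                 parts.append(code[i + 1:j] + '_')
--                 i = j
--             else:
--                 parts.append(c)
--                 i += 1
--         else:
--             parts.append(c)
--             i += 1
--     return ''.join(parts)
-- ===== Notes on version B (the rewrite author's own statement) =====
-- stated objective: alternative
-- what changed: Replaces A's nested per-character copy loops with a single token-per-iteration loop that locates string/backtick/comment delimiters via str.find (with a find-and-skip loop for escaped quotes) and emits whole slices joined at the end.
import Mathlib
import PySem

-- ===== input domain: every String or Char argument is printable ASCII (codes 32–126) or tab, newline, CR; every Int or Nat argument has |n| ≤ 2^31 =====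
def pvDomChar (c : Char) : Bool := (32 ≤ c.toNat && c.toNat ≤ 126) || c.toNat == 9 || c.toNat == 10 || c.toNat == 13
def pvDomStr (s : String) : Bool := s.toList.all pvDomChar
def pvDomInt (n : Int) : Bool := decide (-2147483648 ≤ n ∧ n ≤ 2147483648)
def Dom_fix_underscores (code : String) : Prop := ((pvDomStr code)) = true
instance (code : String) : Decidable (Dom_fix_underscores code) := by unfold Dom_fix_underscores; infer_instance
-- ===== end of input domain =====

-- B rewrites `_name` identifiers to `name_` outside strings/`//` comments by jumping
-- between delimiters with substring search and emitting whole slices, instead of A's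
-- nested per-character copy loops (objective: alternative; same asymptotic cost).

-- ===== PORT A =====
-- A's index-based while loops are transliterated as structural recursions over the
-- remaining character list; the running character `prev` de-indexes Python's code[i-1].

-- inner loop of the '"' branch: append chars until a '"' whose predecessor is not '\'
def aStr (prev : Char) : List Char → List Char × List Char
  | [] => ([], [])
  | c :: rest =>
    if c = '"' ∧ prev ≠ '\\' then ([c], rest)
    else ((c :: (aStr c rest).1), (aStr c rest).2)

-- inner loop of the 'b`' branch: append chars until (and including) a '`'
def aBq : List Char → List Char × List Char
  | [] => ([], [])
  | c :: rest =>
    if c = '`' then ([c], rest)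
    else ((c :: (aBq rest).1), (aBq rest).2)

-- inner loop of the '//' branch: append chars while not '\n' (the '\n' stays unread)
def aCmt : List Char → List Char × List Char
  | [] => ([], [])
  | c :: rest =>
    if c = '\n' then ([], c :: rest)
    else ((c :: (aCmt rest).1), (aCmt rest).2)

-- inner loop of the '_' branch: capture chars while isalnum or '_'
def aIdent : List Char → List Char × List Char
  | [] => ([], [])
  | c :: rest =>
    if PySem.Chars.isalnum c || c = '_' then ((c :: (aIdent rest).1), (aIdent rest).2)
    else ([], c :: rest)

-- remaining-input bounds, used only for aMain's termination
theorem aStr_snd_le (prev : Char) (l : List Char) : (aStr prev l).2.length ≤ l.length := by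
  induction l generalizing prev with
  | nil => simp [aStr]
  | cons c rest ih =>
    simp only [aStr]
    split
    · simp
    · exact le_trans (ih c) (by simp)

theorem aBq_snd_le (l : List Char) : (aBq l).2.length ≤ l.length := by
  induction l with
  | nil => simp [aBq]
  | cons c rest ih =>
    simp only [aBq]; split
    · simp
    · exact le_trans ih (by simp)

theorem aCmt_snd_le (l : List Char) : (aCmt l).2.length ≤ l.length := by
  induction l with
  | nil => simp [aCmt]
  | cons c rest ih =>
    simp only [aCmt]; split
    · simp
    · exact le_trans ih (by simp)

theorem aIdent_snd_le (l : List Char) : (aIdent l).2.length ≤ l.length := by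
  induction l with
  | nil => simp [aIdent]
  | cons c rest ih =>
    simp only [aIdent]; split
    · exact le_trans ih (by simp)
    · simp

-- the outer while loop of A; `prev` is code[i-1] (' ' at the start, as in A's '_' branch)
def aMain (prev : Char) (cs : List Char) : List Char :=
  match cs with
  | [] => []
  | c :: rest =>
    if _hq : c = '"' then
      c :: (aStr '"' rest).1 ++ aMain '"' (aStr '"' rest).2
    else if _hb : c = 'b' ∧ rest.head? = some '`' then
      'b' :: '`' :: (aBq rest.tail).1 ++ aMain '`' (aBq rest.tail).2
    else if hc : c = '/' ∧ rest.head? = some '/' then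
      (aCmt (c :: rest)).1 ++ aMain '/' (aCmt (c :: rest)).2
    else if _hi : c = '_' ∧ (¬(PySem.Chars.isalnum prev = true) ∧ prev ≠ '_') ∧
         (rest.head?.elim false PySem.Chars.isalnum) = true then
      (aIdent rest).1 ++ '_' :: aMain ((aIdent rest).1.getLastD 'a') (aIdent rest).2
    else
      c :: aMain c rest
termination_by cs.length
decreasing_by
  · have := aStr_snd_le '"' rest; simp; omega
  · have h1 := aBq_snd_le rest.tail
    have h2 : rest.tail.length ≤ rest.length := by simp
    simp; omega
  · have hne : ¬ (c = '\n') := by rw [hc.1]; decide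
    have h2 := aCmt_snd_le rest
    simp only [aCmt, if_neg hne]
    simp; omega
  · have := aIdent_snd_le rest; simp; omega
  · simp

def fix_underscores (code : String) : String := String.ofList (aMain ' ' code.toList)

-- ===== PORT B =====
-- B works with str.find and slices; the port keeps positions relative to the current
-- suffix (code.find(sub, j) = j + find(code[j:], sub)), which de-indexes B's jumps.

-- B's close-quote search: j = code.find('"', i+1); while j != -1 and code[j-1] == '\\':
-- j = code.find('"', j+1).  `p` is the character just before the suffix `t`, `base` the
-- offset of `t` in the searched region; returns an index relative to the region, or -1.
def bCloseQuote (p : Char) (t : List Char) (base : Nat) : Int :=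
  let f := PySem.Chars.find t ['"']
  if hf : f = -1 then -1
  else
    let k := f.toNat
    let pr := if k = 0 then p else t.getD (k - 1) ' '
    if pr = '\\' then bCloseQuote '"' (t.drop (k + 1)) (base + k + 1)
    else (base + k : Nat)
termination_by t.length
decreasing_by
  have h1 := PySem.Chars.find_le_length t ['"']
  have h2 := PySem.Chars.neg_one_le_find t ['"']
  have h0 : (0:Int) ≤ PySem.Chars.find t ['"'] := by omega
  rcases (PySem.Chars.find_spec h0).1 with ⟨u, hu⟩
  have h3 := congrArg List.length hu
  simp at h3
  simp
  omega

-- B's identifier scan: j loop counting leading word characters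
def bWordLen : List Char → Nat
  | [] => 0
  | c :: rest => if PySem.Chars.isalnum c || c = '_' then bWordLen rest + 1 else 0

-- helper for bLoop's termination: a found single character really occurs there
theorem find_singleton_index_lt (t : List Char) (x : Char)
    (h : PySem.Chars.find t [x] ≠ -1) :
    (PySem.Chars.find t [x]).toNat < t.length ∧
      t.getD (PySem.Chars.find t [x]).toNat ' ' = x := by
  have h2 := PySem.Chars.neg_one_le_find t [x]
  have h0 : (0:Int) ≤ PySem.Chars.find t [x] := by omega
  rcases (PySem.Chars.find_spec h0).1 with ⟨u, hu⟩
  have h3 := congrArg List.length hu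
  simp at h3
  have hlt : (PySem.Chars.find t [x]).toNat < t.length := by omega
  refine ⟨hlt, ?_⟩
  have h4 : (t.drop (PySem.Chars.find t [x]).toNat).getD 0 ' ' = x := by rw [← hu]; simp
  simpa [List.getD, List.getElem?_drop] using h4

-- B's main while loop: one token (a whole slice) per iteration, appended to `parts`
def bLoop (prev : Char) (s : List Char) : List (List Char) :=
  match s with
  | [] => []
  | c :: t =>
    if _hq : c = '"' then
      if _hj : bCloseQuote '"' t 0 = -1 then [c :: t]
      else (c :: t.take ((bCloseQuote '"' t 0).toNat + 1)) ::
        bLoop '"' (t.drop ((bCloseQuote '"' t 0).toNat + 1))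
    else if _hb : c = 'b' ∧ t.head? = some '`' then
      if _hf : PySem.Chars.find t.tail ['`'] = -1 then [c :: t]
      else ('b' :: '`' :: t.tail.take ((PySem.Chars.find t.tail ['`']).toNat + 1)) ::
        bLoop '`' (t.tail.drop ((PySem.Chars.find t.tail ['`']).toNat + 1))
    else if hc : c = '/' ∧ t.head? = some '/' then
      if hf : PySem.Chars.find (c :: t) ['\n'] = -1 then [c :: t]
      else ((c :: t).take (PySem.Chars.find (c :: t) ['\n']).toNat) ::
        bLoop '/' ((c :: t).drop (PySem.Chars.find (c :: t) ['\n']).toNat)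
    else if _hi : c = '_' ∧ (¬(PySem.Chars.isalnum prev = true) ∧ prev ≠ '_') ∧
         (t.head?.elim false PySem.Chars.isalnum) = true then
      (t.take (bWordLen t) ++ ['_']) ::
        bLoop ((t.take (bWordLen t)).getLastD 'a') (t.drop (bWordLen t))
    else
      [c] :: bLoop c t
termination_by s.length
decreasing_by
  all_goals simp
  have h5 := find_singleton_index_lt (c :: t) '\n' hf
  rcases h5 with ⟨hlt, hx⟩
  rcases Nat.eq_zero_or_pos (PySem.Chars.find (c :: t) ['\n']).toNat with h0 | h0
  · rw [h0] at hx; rw [hc.1] at hx; simp at hx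
  · omega

def fix_underscores_alt (code : String) : String :=
  String.ofList (bLoop ' ' code.toList).flatten

-- ===== PRECONDITION & SPEC =====
def Spec_fix_underscores (code : String) (out : String) : Prop := out = fix_underscores_alt code
instance (code : String) (out : String) : Decidable (Spec_fix_underscores code out) := by unfold Spec_fix_underscores; infer_instance

-- ===== CLAIM (what is proved, stated in full; the proofs are below) =====
def Claim_equal_fix_underscores : Prop := ∀ (code : String), Dom_fix_underscores code → Spec_fix_underscores code (fix_underscores code)

-- ===== LEMMAS AND PROOFS =====

-- the word-character predicate both '_' branches test
def wB (c : Char) : Bool := PySem.Chars.isalnum c || decide (c = '_')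

-- a singleton is a prefix of a drop iff the element sits at that index
theorem pfx_singleton_drop (t : List Char) (i : Nat) (x : Char) :
    [x] <+: t.drop i ↔ t[i]? = some x := by
  rw [← List.head?_drop]
  cases h : t.drop i with
  | nil => simp
  | cons c r => simp [List.cons_prefix_cons, eq_comm]

-- str.find for a single character is the first index of that character
theorem find_singleton (t : List Char) (x : Char) :
    PySem.Chars.find t [x] = (match t.findIdx? (fun c => decide (c = x)) with
      | none => (-1 : Int) | some k => (k : Int)) := by
  cases h : t.findIdx? (fun c => decide (c = x)) with
  | none =>
    have hnone : ∀ i : Nat, ¬ ([x] <+: t.drop i) := by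
      intro i hp
      have hg := (pfx_singleton_drop t i x).mp hp
      have hm : x ∈ t := List.mem_of_getElem? hg
      have := List.findIdx?_eq_none_iff.mp h x hm
      simp at this
    have hni : ¬ ([x] <:+: t) := by
      intro hin
      have h1 : PySem.Chars.isIn [x] t = true := (PySem.Chars.isIn_iff_infix _ _).mpr hin
      have h2 := (PySem.Chars.exists_prefix_drop_iff_isIn (sub := [x]) (s := t)).mpr h1
      rcases h2 with ⟨j, hj⟩
      exact hnone j hj
    simpa using (PySem.Chars.find_eq_neg_one_iff _ _).mpr hni
  | some k =>
    obtain ⟨hk, hpk, hmin⟩ := List.findIdx?_eq_some_iff_getElem.mp h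
    have hkx : t[k]? = some x := by
      rw [List.getElem?_eq_getElem hk]
      simpa using hpk
    have hpfk : [x] <+: t.drop k := (pfx_singleton_drop t k x).mpr hkx
    have hmem : [x] <:+: t :=
      (PySem.Chars.isIn_iff_infix _ _).mp
        ((PySem.Chars.exists_prefix_drop_iff_isIn (sub := [x]) (s := t)).mp ⟨k, hpfk⟩)
    have h0 : (0:Int) ≤ PySem.Chars.find t [x] := (PySem.Chars.find_nonneg_iff _ _).mpr hmem
    obtain ⟨hpf, hminf⟩ := PySem.Chars.find_spec h0
    have hfx := (pfx_singleton_drop t _ x).mp hpf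
    have hle1 : k ≤ (PySem.Chars.find t [x]).toNat := by
      rcases Nat.lt_or_ge (PySem.Chars.find t [x]).toNat k with hlt | hge
      · obtain ⟨hm, hval⟩ := List.getElem?_eq_some_iff.mp hfx
        have h2 := hmin _ hlt
        simp [hval] at h2
      · exact hge
    have hle2 : (PySem.Chars.find t [x]).toNat ≤ k := by
      rcases Nat.lt_or_ge k (PySem.Chars.find t [x]).toNat with hlt | hge
      · exact absurd hpfk (hminf k hlt)
      · exact hge
    simp only []
    omega

-- the index (if any) at which A's string loop stops: first '"' not preceded by '\'
def firstStop (p : Char) : List Char → Option Nat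
  | [] => none
  | c :: r => if c = '"' ∧ p ≠ '\\' then some 0 else (firstStop c r).map (· + 1)

theorem aStr_eq (t : List Char) (p : Char) :
    aStr p t = (match firstStop p t with
      | none => (t, ([] : List Char))
      | some k => (t.take (k+1), t.drop (k+1))) := by
  induction t generalizing p with
  | nil => simp [aStr, firstStop]
  | cons c r ih =>
    by_cases hc : (c = '"' ∧ p ≠ '\\')
    · simp [aStr, firstStop, hc]
    · simp only [aStr, firstStop, if_neg hc]
      rw [ih c]
      cases h : firstStop c r <;> simp [h]

theorem firstStop_none (t : List Char) (p : Char) (h : ∀ a ∈ t, a ≠ '"') :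
    firstStop p t = none := by
  induction t generalizing p with
  | nil => rfl
  | cons c r ih =>
    have hc : c ≠ '"' := h c (by simp)
    have hcond : ¬(c = '"' ∧ p ≠ '\\') := fun hh => hc hh.1
    simp only [firstStop, if_neg hcond]
    rw [ih c (fun a ha => h a (by simp [ha]))]
    rfl

theorem firstStop_first (t : List Char) (p : Char) (k : Nat)
    (hx : t[k]? = some '"') (hmin : ∀ j, j < k → t[j]? ≠ some '"')
    (hpr : (if k = 0 then p else t.getD (k-1) ' ') ≠ '\\') :
    firstStop p t = some k := by
  induction t generalizing p k with
  | nil => simp at hx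
  | cons c r ih =>
    cases k with
    | zero =>
      have hc : c = '"' := by simpa using hx
      rw [if_pos rfl] at hpr
      simp [firstStop, hc, hpr]
    | succ k' =>
      have hc : c ≠ '"' := by
        have := hmin 0 (Nat.succ_pos k')
        simpa using this
      have hcond : ¬(c = '"' ∧ p ≠ '\\') := fun hh => hc hh.1
      simp only [firstStop, if_neg hcond]
      rw [ih c k' (by simpa using hx) (fun j hj => by simpa using hmin (j+1) (by omega))
        (by
          rw [if_neg (Nat.succ_ne_zero k')] at hpr
          cases k' with
          | zero => simpa using hpr
          | succ m => simpa using hpr)]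
      simp

theorem firstStop_skip (t : List Char) (p : Char) (k : Nat)
    (hx : t[k]? = some '"') (hmin : ∀ j, j < k → t[j]? ≠ some '"')
    (hpr : (if k = 0 then p else t.getD (k-1) ' ') = '\\') :
    firstStop p t = (firstStop '"' (t.drop (k+1))).map (· + (k+1)) := by
  induction t generalizing p k with
  | nil => simp at hx
  | cons c r ih =>
    cases k with
    | zero =>
      have hc : c = '"' := by simpa using hx
      rw [if_pos rfl] at hpr
      simp [firstStop, hc, hpr]
    | succ k' =>
      have hc : c ≠ '"' := by
        have := hmin 0 (Nat.succ_pos k')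
        simpa using this
      have hcond : ¬(c = '"' ∧ p ≠ '\\') := fun hh => hc hh.1
      simp only [firstStop, if_neg hcond]
      rw [ih c k' (by simpa using hx) (fun j hj => by simpa using hmin (j+1) (by omega))
        (by
          rw [if_neg (Nat.succ_ne_zero k')] at hpr
          cases k' with
          | zero => simpa using hpr
          | succ m => simpa using hpr)]
      simp only [List.drop_succ_cons]
      cases h : firstStop '"' (r.drop (k'+1)) with
      | none => simp
      | some m =>
        simp only [Option.map_some]
        congr 1

theorem bCloseQuote_eq : ∀ (n : Nat) (t : List Char), t.length ≤ n → ∀ (p : Char) (b : Nat),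
    bCloseQuote p t b = (match firstStop p t with
      | none => (-1 : Int) | some k => ((b + k : Nat) : Int)) := by
  intro n
  induction n with
  | zero =>
    intro t ht p b
    have ht0 : t = [] := by cases t <;> simp_all
    subst ht0
    have hf : PySem.Chars.find ([] : List Char) ['"'] = -1 := by
      rw [find_singleton]
      simp
    rw [bCloseQuote]
    simp [hf, firstStop]
  | succ n ih =>
    intro t ht p b
    rw [bCloseQuote]
    rw [find_singleton t '"']
    cases h : t.findIdx? (fun c => decide (c = '"')) with
    | none =>
      have hne : ∀ a ∈ t, a ≠ '"' := by
        intro a ha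
        have := List.findIdx?_eq_none_iff.mp h a ha
        simpa using this
      rw [firstStop_none t p hne]
      simp
    | some k =>
      obtain ⟨hk, hpk, hmin⟩ := List.findIdx?_eq_some_iff_getElem.mp h
      have hx : t[k]? = some '"' := by
        rw [List.getElem?_eq_getElem hk]
        simpa using hpk
      have hmin' : ∀ j, j < k → t[j]? ≠ some '"' := by
        intro j hj hcon
        obtain ⟨hjl, hval⟩ := List.getElem?_eq_some_iff.mp hcon
        have := hmin j hj
        simp [hval] at this
      simp only []
      have hne : ((k:Int) ≠ -1) := by omega
      rw [dif_neg hne]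
      simp only [Int.toNat_natCast]
      by_cases hpr : (if k = 0 then p else t.getD (k-1) ' ') = '\\'
      · rw [if_pos hpr]
        rw [ih (t.drop (k+1)) (by simp; omega) '"' (b + k + 1)]
        rw [firstStop_skip t p k hx hmin' hpr]
        cases hfs : firstStop '"' (t.drop (k+1)) with
        | none => simp
        | some m =>
          simp only [Option.map_some]
          congr 1
          omega
      · rw [if_neg hpr]
        rw [firstStop_first t p k hx hmin' hpr]

theorem aBq_eq (t : List Char) :
    aBq t = (match t.findIdx? (fun c => decide (c = '`')) with
      | none => (t, ([] : List Char))
      | some k => (t.take (k+1), t.drop (k+1))) := by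
  induction t with
  | nil => simp [aBq]
  | cons c r ih =>
    by_cases hc : c = '`'
    · simp [aBq, hc, List.findIdx?_cons]
    · simp only [aBq, if_neg hc, List.findIdx?_cons, decide_eq_true_eq]
      rw [ih]
      cases h : r.findIdx? (fun c => decide (c = '`')) <;>
        simp [h, List.take_succ_cons, List.drop_succ_cons]

theorem aCmt_eq (t : List Char) :
    aCmt t = (match t.findIdx? (fun c => decide (c = '\n')) with
      | none => (t, ([] : List Char))
      | some k => (t.take k, t.drop k)) := by
  induction t with
  | nil => simp [aCmt]
  | cons c r ih =>
    by_cases hc : c = '\n'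
    · simp [aCmt, hc, List.findIdx?_cons]
    · simp only [aCmt, if_neg hc, List.findIdx?_cons, decide_eq_true_eq]
      rw [ih]
      cases h : r.findIdx? (fun c => decide (c = '\n')) <;>
        simp [h, List.take_succ_cons, List.drop_succ_cons]

theorem aIdent_eq (t : List Char) : aIdent t = (t.takeWhile wB, t.dropWhile wB) := by
  induction t with
  | nil => simp [aIdent]
  | cons c r ih =>
    by_cases hc : wB c = true
    · have hc' : (PySem.Chars.isalnum c || decide (c = '_')) = true := by simpa [wB] using hc
      simp only [aIdent, hc', if_pos rfl]
      rw [ih]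
      simp [List.takeWhile_cons, List.dropWhile_cons, hc]
    · have hcf : wB c = false := by revert hc; cases wB c <;> simp
      have hc' : (PySem.Chars.isalnum c || decide (c = '_')) = false := by simpa [wB] using hcf
      simp only [aIdent, hc']
      simp [List.takeWhile_cons, List.dropWhile_cons, hcf]

theorem bWordLen_eq (t : List Char) : bWordLen t = (t.takeWhile wB).length := by
  induction t with
  | nil => simp [bWordLen]
  | cons c r ih =>
    by_cases hc : wB c = true
    · have hc' : (PySem.Chars.isalnum c || decide (c = '_')) = true := by simpa [wB] using hc
      simp only [bWordLen, hc', if_pos rfl]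
      rw [ih]
      simp [List.takeWhile_cons, hc]
    · have hcf : wB c = false := by revert hc; cases wB c <;> simp
      have hc' : (PySem.Chars.isalnum c || decide (c = '_')) = false := by simpa [wB] using hcf
      simp only [bWordLen, hc']
      simp [List.takeWhile_cons, hcf]

theorem take_takeWhile (t : List Char) :
    t.take (t.takeWhile wB).length = t.takeWhile wB ∧
      t.drop (t.takeWhile wB).length = t.dropWhile wB := by
  have key : ∀ a b : List Char, a ++ b = t → t.takeWhile wB = a →
      t.take a.length = a ∧ t.drop a.length = b := by
    intro a b hab hta
    subst hab
    exact ⟨List.take_left, List.drop_left⟩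
  have h := key _ _ List.takeWhile_append_dropWhile rfl
  exact h

theorem main_go : ∀ (n : Nat) (s : List Char), s.length ≤ n → ∀ (prev : Char),
    aMain prev s = (bLoop prev s).flatten := by
  intro n
  induction n with
  | zero =>
    intro s hs prev
    have : s = [] := by cases s <;> simp_all
    subst this
    simp [aMain, bLoop]
  | succ n ih =>
    intro s hs prev
    cases s with
    | nil => simp [aMain, bLoop]
    | cons c t =>
      rw [aMain, bLoop]
      by_cases hq : c = '"'
      · rw [dif_pos hq, dif_pos hq]
        rw [bCloseQuote_eq (t.length) t le_rfl '"' 0, aStr_eq]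
        cases hfs : firstStop '"' t with
        | none =>
          simp [aMain]
        | some k =>
          simp only []
          have hne : (((0 + k : Nat) : Int) ≠ -1) := by omega
          rw [dif_neg hne]
          simp only [Int.toNat_natCast, Nat.zero_add]
          rw [ih (t.drop (k+1)) (by simp at hs ⊢; omega) '"']
          simp
      · rw [dif_neg hq, dif_neg hq]
        by_cases hb : (c = 'b' ∧ t.head? = some '`')
        · rw [dif_pos hb, dif_pos hb]
          cases t with
          | nil => simp at hb
          | cons d t' =>
            have hd : d = '`' := by simpa using hb.2
            simp only [List.tail_cons]
            rw [find_singleton t' '`', aBq_eq t']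
            cases hfi : t'.findIdx? (fun c => decide (c = '`')) with
            | none =>
              simp [aMain, hb.1, hd]
            | some k =>
              simp only []
              rw [dif_neg (by omega : ((k:Int) ≠ -1))]
              simp only [Int.toNat_natCast]
              rw [ih (t'.drop (k+1)) (by simp at hs ⊢; omega) '`']
              simp [hb.1, hd]
        · rw [dif_neg hb, dif_neg hb]
          by_cases hc : (c = '/' ∧ t.head? = some '/')
          · rw [dif_pos hc, dif_pos hc]
            rw [find_singleton, aCmt_eq]
            cases hfi : (c :: t).findIdx? (fun x => decide (x = '\n')) with
            | none =>
              simp [aMain]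
            | some k =>
              obtain ⟨hk, hpk, _⟩ := List.findIdx?_eq_some_iff_getElem.mp hfi
              have hx : (c :: t)[k]? = some '\n' := by
                rw [List.getElem?_eq_getElem hk]
                simpa using hpk
              have hk0 : k ≠ 0 := by
                intro h0
                subst h0
                rw [hc.1] at hx
                simp at hx
              simp only []
              rw [dif_neg (by omega : ((k:Int) ≠ -1))]
              simp only [Int.toNat_natCast]
              rw [ih ((c :: t).drop k) (by simp at hs ⊢; omega) '/']
              simp
          · rw [dif_neg hc, dif_neg hc]
            by_cases hi : (c = '_' ∧ (¬(PySem.Chars.isalnum prev = true) ∧ prev ≠ '_') ∧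
                (t.head?.elim false PySem.Chars.isalnum) = true)
            · rw [dif_pos hi, dif_pos hi]
              rw [aIdent_eq, bWordLen_eq]
              simp only []
              rw [(take_takeWhile t).1, (take_takeWhile t).2]
              rw [ih (t.dropWhile wB) (by
                have := List.length_dropWhile_le (p := wB) (l := t)
                simp at hs ⊢; omega) ((t.takeWhile wB).getLastD 'a')]
              simp
            · rw [dif_neg hi, dif_neg hi]
              rw [ih t (by simp at hs; omega) c]
              simp

theorem main_eq (s : List Char) (prev : Char) :
    aMain prev s = (bLoop prev s).flatten :=
  main_go s.length s le_rfl prev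

-- ===== VERDICT (by name: the statement is the Claim_ definition above) =====
theorem fix_underscores_spec : Claim_equal_fix_underscores := by
  intro code _
  unfold Spec_fix_underscores fix_underscores fix_underscores_alt
  rw [main_eq]
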